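-- pv_equiv track=rewrite | github.com/Hugoved/pydecrypt | pydecrypt.py | compute_sample_offsets
-- ===== SOURCE A (Python) =====
-- from typing import Dict, List, Optional, Tuple
--
-- def compute_sample_offsets(chunk_offsets: List[int], stsc: List[Tuple[int, int, int]], sample_sizes: List[int]) -> List[int]:
--     if not chunk_offsets or not stsc or not sample_sizes:
--         return []
--     offsets = []
--     sample_index = 0
--     for i, (first_chunk, samples_per_chunk, _) in enumerate(stsc):
--         next_first_chunk = stsc[i + 1][0] if i + 1 < len(stsc) else len(chunk_offsets) + 1
--         for chunk_number in range(first_chunk, next_first_chunk):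
--             if chunk_number - 1 >= len(chunk_offsets):
--                 break
--             current = chunk_offsets[chunk_number - 1]
--             for _ in range(samples_per_chunk):
--                 if sample_index >= len(sample_sizes):
--                     break
--                 offsets.append(current)
--                 current += sample_sizes[sample_index]
--                 sample_index += 1
--     return offsets
-- ===== SOURCE B (Python) =====
-- from typing import List, Tuple
--
-- def compute_sample_offsets(chunk_offsets: List[int], stsc: List[Tuple[int, int, int]], sample_sizes: List[int]) -> List[int]:
--     if not chunk_offsets or not stsc or not sample_sizes:
--         return []
--     # Pass 1: flatten the stsc table into one (base_offset, samples_per_chunk) pair per chunk.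
--     plan = []
--     for i, (first_chunk, samples_per_chunk, _) in enumerate(stsc):
--         next_first_chunk = stsc[i + 1][0] if i + 1 < len(stsc) else len(chunk_offsets) + 1
--         for chunk_number in range(first_chunk, next_first_chunk):
--             if chunk_number - 1 >= len(chunk_offsets):
--                 break
--             plan.append((chunk_offsets[chunk_number - 1], samples_per_chunk))
--     # Pass 2: emit sample offsets from the flat plan until the samples run out.
--     offsets = []
--     sample_index = 0
--     for base, spc in plan:
--         current = base
--         n = min(spc, len(sample_sizes) - sample_index)
--         for _ in range(n):
--             offsets.append(current)
--             current += sample_sizes[sample_index]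
--             sample_index += 1
--     return offsets
-- ===== Notes on version B (the rewrite author's own statement) =====
-- stated objective: alternative
-- what changed: B splits A's triply-nested loop into two passes: first flatten the stsc table into one (base_offset, samples_per_chunk) pair per chunk, then emit offsets from that flat plan with each chunk's sample count precomputed as min(spc, remaining) instead of a per-sample break.
import Mathlib
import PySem

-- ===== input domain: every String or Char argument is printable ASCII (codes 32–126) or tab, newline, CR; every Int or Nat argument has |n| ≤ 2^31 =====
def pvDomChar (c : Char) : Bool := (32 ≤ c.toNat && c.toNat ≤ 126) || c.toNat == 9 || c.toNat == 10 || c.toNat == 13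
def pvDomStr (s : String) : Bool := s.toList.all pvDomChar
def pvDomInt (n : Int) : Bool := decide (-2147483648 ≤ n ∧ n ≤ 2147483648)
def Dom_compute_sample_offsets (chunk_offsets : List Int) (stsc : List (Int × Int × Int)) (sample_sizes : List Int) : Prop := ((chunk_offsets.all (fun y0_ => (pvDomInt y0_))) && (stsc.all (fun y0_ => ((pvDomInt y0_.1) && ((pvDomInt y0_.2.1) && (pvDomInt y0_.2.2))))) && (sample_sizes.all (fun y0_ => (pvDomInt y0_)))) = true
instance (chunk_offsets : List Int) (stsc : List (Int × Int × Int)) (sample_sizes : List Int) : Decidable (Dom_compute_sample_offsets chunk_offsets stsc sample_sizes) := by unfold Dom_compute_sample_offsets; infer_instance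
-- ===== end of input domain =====

-- B replaces A's single triply-nested loop by two passes (flatten stsc into one
-- (base_offset, samples_per_chunk) pair per chunk, then emit offsets from that flat
-- plan with the per-chunk sample count precomputed as a min): a different
-- decomposition of the same exact computation (objective: alternative).

-- ===== PORT A =====
-- inner 'for _ in range(samples_per_chunk)' with its sample-exhaustion break
def csoEmit (sizes : List Int) : Nat → Int → List Int → Nat → List Int × Nat
  | 0, _, acc, si => (acc, si)
  | Nat.succ k, cur, acc, si =>
      if sizes.length ≤ si then (acc, si)
      else csoEmit sizes k (cur + PySem.List.pyGetD sizes (si : Int) 0) (acc ++ [cur]) (si + 1)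

-- 'for chunk_number in range(first_chunk, next_first_chunk)' with its break
def csoChunks (co sizes : List Int) (spc : Int) : List Int → List Int → Nat → List Int × Nat
  | [], acc, si => (acc, si)
  | c :: rest, acc, si =>
      if c - 1 ≥ (co.length : Int) then (acc, si)
      else
        let r := csoEmit sizes spc.toNat (PySem.List.pyGetD co (c - 1) 0) acc si
        csoChunks co sizes spc rest r.1 r.2

-- 'for i, (first_chunk, samples_per_chunk, _) in enumerate(stsc)'
def csoOuter (co sizes : List Int) : List (Int × Int × Int) → List Int → Nat → List Int × Nat
  | [], acc, si => (acc, si)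
  | (fc, spc, _) :: rest, acc, si =>
      let nfc := match rest with | [] => (co.length : Int) + 1 | (nf, _, _) :: _ => nf
      let r := csoChunks co sizes spc (PySem.List.pyRange fc nfc 1) acc si
      csoOuter co sizes rest r.1 r.2

def compute_sample_offsets (chunk_offsets : List Int) (stsc : List (Int × Int × Int)) (sample_sizes : List Int) : List Int :=
  if chunk_offsets = [] ∨ stsc = [] ∨ sample_sizes = [] then []
  else (csoOuter chunk_offsets sample_sizes stsc [] 0).1

-- ===== PORT B =====
-- pass 1, inner chunk loop: collect one (base_offset, samples_per_chunk) pair per chunk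
def csoPlanChunks (co : List Int) (spc : Int) : List Int → List (Int × Int) → List (Int × Int)
  | [], acc => acc
  | c :: rest, acc =>
      if c - 1 ≥ (co.length : Int) then acc
      else csoPlanChunks co spc rest (acc ++ [(PySem.List.pyGetD co (c - 1) 0, spc)])

-- pass 1, outer loop over the stsc entries
def csoPlan (co : List Int) : List (Int × Int × Int) → List (Int × Int) → List (Int × Int)
  | [], acc => acc
  | (fc, spc, _) :: rest, acc =>
      let nfc := match rest with | [] => (co.length : Int) + 1 | (nf, _, _) :: _ => nf
      csoPlan co rest (csoPlanChunks co spc (PySem.List.pyRange fc nfc 1) acc)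

-- 'for _ in range(n)' — no break needed, n is precomputed
def csoEmitN (sizes : List Int) : Nat → Int → List Int → Nat → List Int × Nat
  | 0, _, acc, si => (acc, si)
  | Nat.succ k, cur, acc, si =>
      csoEmitN sizes k (cur + PySem.List.pyGetD sizes (si : Int) 0) (acc ++ [cur]) (si + 1)

-- pass 2: 'for base, spc in plan' with n = min(spc, len(sample_sizes) - sample_index)
def csoRun (sizes : List Int) : List (Int × Int) → List Int → Nat → List Int × Nat
  | [], acc, si => (acc, si)
  | (base, spc) :: rest, acc, si =>
      let n : Int := min spc ((sizes.length : Int) - (si : Int))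
      let r := csoEmitN sizes n.toNat base acc si
      csoRun sizes rest r.1 r.2

def compute_sample_offsets_alt (chunk_offsets : List Int) (stsc : List (Int × Int × Int)) (sample_sizes : List Int) : List Int :=
  if chunk_offsets = [] ∨ stsc = [] ∨ sample_sizes = [] then []
  else (csoRun sample_sizes (csoPlan chunk_offsets stsc []) [] 0).1

-- ===== PRECONDITION & SPEC =====
-- Pre_ excludes exactly the inputs where Python A raises IndexError: some stsc entry
-- whose chunk range is nonempty starts at a chunk whose index chunk_number-1 is below
-- -len(chunk_offsets) (too negative even for Python's negative indexing).
def Pre_compute_sample_offsets (chunk_offsets : List Int) (stsc : List (Int × Int × Int)) (sample_sizes : List Int) : Prop :=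
  chunk_offsets = [] ∨ stsc = [] ∨ sample_sizes = [] ∨
  ∀ i ∈ List.range stsc.length,
    (stsc.getD i (0, 0, 0)).1 - 1 ≥ -(chunk_offsets.length : Int) ∨
    ¬ ((stsc.getD i (0, 0, 0)).1 <
        (if i + 1 < stsc.length then (stsc.getD (i + 1) (0, 0, 0)).1 else (chunk_offsets.length : Int) + 1))
instance (chunk_offsets : List Int) (stsc : List (Int × Int × Int)) (sample_sizes : List Int) : Decidable (Pre_compute_sample_offsets chunk_offsets stsc sample_sizes) := by unfold Pre_compute_sample_offsets; infer_instance

def pvWitness_compute_sample_offsets : List Int × (List (Int × Int × Int)) × List Int :=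
  ([100, 200], [(1, 2, 0), (2, 1, 0)], [5, 6, 7])

def Spec_compute_sample_offsets (chunk_offsets : List Int) (stsc : List (Int × Int × Int)) (sample_sizes : List Int) (out : List Int) : Prop := out = compute_sample_offsets_alt chunk_offsets stsc sample_sizes
instance (chunk_offsets : List Int) (stsc : List (Int × Int × Int)) (sample_sizes : List Int) (out : List Int) : Decidable (Spec_compute_sample_offsets chunk_offsets stsc sample_sizes out) := by unfold Spec_compute_sample_offsets; infer_instance

-- ===== CLAIM (what is proved, stated in full; the proofs are below) =====
def Claim_equal_compute_sample_offsets : Prop := ∀ (chunk_offsets : List Int) (stsc : List (Int × Int × Int)) (sample_sizes : List Int), Dom_compute_sample_offsets chunk_offsets stsc sample_sizes → Pre_compute_sample_offsets chunk_offsets stsc sample_sizes → Spec_compute_sample_offsets chunk_offsets stsc sample_sizes (compute_sample_offsets chunk_offsets stsc sample_sizes)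

-- ===== LEMMAS AND PROOFS =====

-- A's breaking sample loop equals B's unconditional loop run min k (len - si) times
theorem csoEmit_eq_emitN (sizes : List Int) :
    ∀ (k : Nat) (cur : Int) (acc : List Int) (si : Nat),
      csoEmit sizes k cur acc si = csoEmitN sizes (min k (sizes.length - si)) cur acc si := by
  intro k
  induction k with
  | zero => intro cur acc si; simp [csoEmit, csoEmitN]
  | succ k ih =>
      intro cur acc si
      by_cases h : sizes.length ≤ si
      · have : min (k + 1) (sizes.length - si) = 0 := by omega
        simp [csoEmit, h, csoEmitN]
      · have hm : min (k + 1) (sizes.length - si) = min k (sizes.length - (si + 1)) + 1 := by omega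
        simp only [csoEmit, if_neg h, hm, csoEmitN]
        exact ih _ _ _

theorem min_toNat_bridge (a : Int) (L s : Nat) :
    (min a ((L : Int) - (s : Int))).toNat = min a.toNat (L - s) := by
  rcases le_total a ((L : Int) - (s : Int)) with h | h
  · rw [min_eq_left h]; omega
  · rw [min_eq_right h]; omega

theorem csoRun_append (sizes : List Int) :
    ∀ (p q : List (Int × Int)) (acc : List Int) (si : Nat),
      csoRun sizes (p ++ q) acc si =
        csoRun sizes q (csoRun sizes p acc si).1 (csoRun sizes p acc si).2 := by
  intro p
  induction p with
  | nil => intro q acc si; simp [csoRun]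
  | cons hd tl ih =>
      intro q acc si
      obtain ⟨base, spc⟩ := hd
      simp only [List.cons_append, csoRun]
      exact ih _ _ _

theorem csoPlanChunks_acc (co : List Int) (spc : Int) :
    ∀ (chunks : List Int) (acc : List (Int × Int)),
      csoPlanChunks co spc chunks acc = acc ++ csoPlanChunks co spc chunks [] := by
  intro chunks
  induction chunks with
  | nil => intro acc; simp [csoPlanChunks]
  | cons c rest ih =>
      intro acc
      by_cases h : c - 1 ≥ (co.length : Int)
      · simp [csoPlanChunks, h]
      · simp only [csoPlanChunks, if_neg h]
        rw [ih (acc ++ [(PySem.List.pyGetD co (c - 1) 0, spc)]), ih ([] ++ [(PySem.List.pyGetD co (c - 1) 0, spc)])]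
        simp

theorem csoPlan_acc (co : List Int) :
    ∀ (stsc : List (Int × Int × Int)) (acc : List (Int × Int)),
      csoPlan co stsc acc = acc ++ csoPlan co stsc [] := by
  intro stsc
  induction stsc with
  | nil => intro acc; simp [csoPlan]
  | cons hd rest ih =>
      intro acc
      obtain ⟨fc, spc, x⟩ := hd
      simp only [csoPlan]
      rw [csoPlanChunks_acc, ih, ih (csoPlanChunks _ _ _ [])]
      simp

theorem csoChunks_eq_run (co sizes : List Int) (spc : Int) :
    ∀ (chunks : List Int) (acc : List Int) (si : Nat),
      csoChunks co sizes spc chunks acc si =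
        csoRun sizes (csoPlanChunks co spc chunks []) acc si := by
  intro chunks
  induction chunks with
  | nil => intro acc si; simp [csoChunks, csoPlanChunks, csoRun]
  | cons c rest ih =>
      intro acc si
      by_cases h : c - 1 ≥ (co.length : Int)
      · simp [csoChunks, csoPlanChunks, h, csoRun]
      · simp only [csoChunks, if_neg h, csoPlanChunks]
        rw [csoPlanChunks_acc co spc rest, List.nil_append, csoRun_append]
        simp only [csoRun]
        rw [ih]
        congr 1 <;>
          rw [min_toNat_bridge, ← csoEmit_eq_emitN]

theorem csoOuter_eq_run (co sizes : List Int) :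
    ∀ (stsc : List (Int × Int × Int)) (acc : List Int) (si : Nat),
      csoOuter co sizes stsc acc si = csoRun sizes (csoPlan co stsc []) acc si := by
  intro stsc
  induction stsc with
  | nil => intro acc si; simp [csoOuter, csoPlan, csoRun]
  | cons hd rest ih =>
      intro acc si
      obtain ⟨fc, spc, x⟩ := hd
      simp only [csoOuter, csoPlan]
      rw [csoPlan_acc co rest, csoRun_append, ih, csoChunks_eq_run]

-- ===== VERDICT (by name: the statement is the Claim_ definition above) =====
theorem compute_sample_offsets_spec : Claim_equal_compute_sample_offsets := by
  intro co stsc sizes _ _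
  unfold Spec_compute_sample_offsets compute_sample_offsets compute_sample_offsets_alt
  split
  · rfl
  · rw [csoOuter_eq_run]
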